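-- pv_equiv track=rewrite | github.com/amksmva/2020-2-level-labs | lab_1/main.py | get_adjacent_words
-- ===== SOURCE A (Python) =====
-- def get_concordance(tokens: list, word: str, left_context_size: int, right_context_size: int) -> list:
--     """
--     Gets a concordance of a word
--     A concordance is a listing of each occurrence of a word in a text,
--     presented with the words surrounding it
--     :param tokens: a list of tokens
--     :param word: a word-base for a concordance
--     :param left_context_size: the number of words in the left context
--     :param right_context_size: the number of words in the right context
--     :return: a concordance
--     e.g. tokens = ['the', 'weather', 'is', 'sunny', 'the', 'man', 'is', 'happy',
--                     'the', 'dog', 'is', 'happy', 'but', 'the', 'cat', 'is', 'sad']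
--     word = 'happy'
--     left_context_size = 2
--     right_context_size = 3
--     --> [['man', 'is', 'happy', 'the', 'dog', 'is'], ['dog', 'is', 'happy', 'but', 'the', 'cat']]
--     """
--     stop = False
--     if not isinstance(tokens, list) or not isinstance(word, str) or len(word) == 0:
--         return []
--     if not isinstance(left_context_size, int) or isinstance(left_context_size, bool):
--         stop = True
--     if not isinstance(right_context_size, int) or isinstance(right_context_size, bool):
--         stop = True
--     if len(tokens) > 0 and not isinstance(tokens[0], str):
--         stop = True
--     if stop:
--         return []
--
--     list_all_words = tokens.copy()
--     indexes = [ind for ind, char in enumerate(list_all_words) if char == word]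
--
--     if len(indexes) == 0 or right_context_size < 0 or left_context_size < 0:
--         return []
--     if right_context_size == 0 and left_context_size == 0:
--         return []
--     if (indexes[-1] + right_context_size) > len(tokens):
--         right_context_size = len(tokens)
--
--     if (indexes[0] - left_context_size) < 0:
--         list_output = [tokens[0:ind + 1 + right_context_size] for ind in indexes]
--     else:
--         list_output = [tokens[ind - left_context_size:ind + 1 + right_context_size] for ind in indexes]
--     return list_output
--
--     check_tokens = isinstance(tokens, list)
--     check_word = isinstance(word, str)
--     check_left_context_size = isinstance(left_context_size, int)
--     check_right_context_size = isinstance(right_context_size, int)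
--
--     if not check_tokens or not check_word:
--         return []
--     if (not check_left_context_size and not check_right_context_size) or (left_context_size < 1 \
--             and right_context_size < 1):
--         return []
--     if isinstance(left_context_size, bool) or isinstance(right_context_size, bool):
--         return []
--
--     if left_context_size < 1:
--         left_context_size = 0
--     elif right_context_size < 1:
--         right_context_size = 0
--
--     concordance = []
--     for index, token in enumerate(tokens):
--         if token == word:
--             mini_concordance = tokens[index - left_context_size: index + right_context_size + 1]
--             concordance.append(mini_concordance)
--     return concordance
--
-- def get_adjacent_words(tokens: list, word: str, left_n: int, right_n: int) -> list:
--     """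
--     Gets adjacent words from the left and right context
--     :param tokens: a list of tokens
--     :param word: a word-base for the search
--     :param left_n: the distance between a word and an adjacent one in the left context
--     :param right_n: the distance between a word and an adjacent one in the right context
--     :return: a list of adjacent words
--     e.g. tokens = ['the', 'weather', 'is', 'sunny', 'the', 'man', 'is', 'happy',
--                     'the', 'dog', 'is', 'happy', 'but', 'the', 'cat', 'is', 'sad']
--     word = 'happy'
--     left_n = 2
--     right_n = 3
--     --> [['man', 'is'], ['dog, 'cat']]
--     """
--     concordance = get_concordance(tokens, word, left_n, right_n)
--     if len(concordance) == 0: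
--         return []
--
--     if left_n == 0:
--         output = [[concord[-1]] for concord in concordance]
--     elif right_n == 0:
--         output = [[concord[0]] for concord in concordance]
--     else:
--         output = [[context[0], context[-1]] for context in concordance]
--     return output
-- ===== SOURCE B (Python) =====
-- def get_adjacent_words(tokens: list, word: str, left_n: int, right_n: int) -> list:
--     """For each occurrence of word, report its neighbour left_n to the left and
--     right_n to the right (clamped to the text), in one pass without building context slices."""
--     if len(word) == 0 or left_n < 0 or right_n < 0 or (left_n == 0 and right_n == 0):
--         return []
--     n = len(tokens)
--     out = []
--     for i, tok in enumerate(tokens):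
--         if tok != word:
--             continue
--         left = tokens[max(i - left_n, 0)]
--         right = tokens[min(i + right_n, n - 1)]
--         if left_n == 0:
--             out.append([right])
--         elif right_n == 0:
--             out.append([left])
--         else:
--             out.append([left, right])
--     return out
-- ===== Notes on version B (the rewrite author's own statement) =====
-- stated objective: faster
-- what changed: B makes one pass over the tokens and reads each occurrence's left/right neighbour directly by clamped index arithmetic, instead of building a full left+right context slice per occurrence (after a global clamping pass) and extracting its first/last element.
-- intended difference: When the first occurrence is within left_n of the start (or the last occurrence within right_n of the end), A clamps the context of EVERY occurrence to the text start (resp. end), so it reports tokens[0] (resp. tokens[-1]) as the neighbour even for occurrences whose true neighbour exists; B reports each occurrence's own clamped neighbour tokens[max(i-left_n,0)] / tokens[min(i+right_n,len-1)], which is what the docstring's per-occurrence adjacency intends. — e.g. on get_adjacent_words(["a", "x", "b", "x", "c"], "x", 2, 0): A returns [["a"], ["a"]], B returns [["a"], ["x"]]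
import Mathlib
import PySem

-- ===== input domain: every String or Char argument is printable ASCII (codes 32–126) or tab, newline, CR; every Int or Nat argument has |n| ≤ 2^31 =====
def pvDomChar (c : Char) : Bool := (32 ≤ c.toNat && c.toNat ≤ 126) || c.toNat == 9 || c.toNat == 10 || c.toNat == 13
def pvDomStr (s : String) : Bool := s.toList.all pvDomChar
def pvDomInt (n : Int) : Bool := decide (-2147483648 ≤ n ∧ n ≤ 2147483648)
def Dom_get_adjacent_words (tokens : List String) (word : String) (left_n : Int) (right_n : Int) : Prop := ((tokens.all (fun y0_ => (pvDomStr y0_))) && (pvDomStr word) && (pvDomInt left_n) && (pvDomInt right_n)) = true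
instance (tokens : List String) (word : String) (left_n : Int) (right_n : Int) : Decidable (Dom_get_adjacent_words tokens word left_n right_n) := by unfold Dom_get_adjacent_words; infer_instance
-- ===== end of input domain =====

-- B reads each occurrence's two clamped neighbours directly in one pass instead of building a full
-- context slice per occurrence; on the inputs of D_ below (A's global clamping) B differs intentionally.

-- ===== PORT A =====
-- indexes = [ind for ind, char in enumerate(list_all_words) if char == word]
def pvIndexesA (list_all_words : List String) (word : String) : List Int :=
  ((PySem.List.enumerate list_all_words 0).filter (fun p => p.2 == word)).map (fun p => p.1)

-- the isinstance checks of get_concordance are identically true under the type convention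
-- (tokens : list[str], word : str, sizes : int), so 'stop' stays False; the code after the first
-- 'return list_output' is unreachable and is not ported.
-- indexes[0]/indexes[-1] and concord[0]/concord[-1] are only read on nonempty lists (guarded),
-- so pyGetD with a dummy default is exact there.
def get_concordance (tokens : List String) (word : String)
    (left_context_size : Int) (right_context_size : Int) : List (List String) :=
  if PySem.Str.len word = 0 then []
  else
    let list_all_words := tokens
    let indexes := pvIndexesA list_all_words word
    if indexes.length = 0 ∨ right_context_size < 0 ∨ left_context_size < 0 then []
    else if right_context_size = 0 ∧ left_context_size = 0 then []
    else
      let right_context_size :=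
        if PySem.List.pyGetD indexes (-1) 0 + right_context_size > (tokens.length : Int)
        then (tokens.length : Int) else right_context_size
      if PySem.List.pyGetD indexes 0 0 - left_context_size < 0 then
        indexes.map (fun ind => PySem.List.slice tokens (some 0) (some (ind + 1 + right_context_size)))
      else
        indexes.map (fun ind =>
          PySem.List.slice tokens (some (ind - left_context_size)) (some (ind + 1 + right_context_size)))

def get_adjacent_words (tokens : List String) (word : String) (left_n : Int) (right_n : Int) : List (List String) :=
  let concordance := get_concordance tokens word left_n right_n
  if concordance.length = 0 then []
  else if left_n = 0 then concordance.map (fun concord => [PySem.List.pyGetD concord (-1) ""])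
  else if right_n = 0 then concordance.map (fun concord => [PySem.List.pyGetD concord 0 ""])
  else concordance.map (fun context => [PySem.List.pyGetD context 0 "", PySem.List.pyGetD context (-1) ""])

-- ===== PORT B =====
-- one pass over enumerate(tokens); every index read is clamped into range, so pyGetD is exact.
def get_adjacent_words_alt (tokens : List String) (word : String) (left_n : Int) (right_n : Int) : List (List String) :=
  if PySem.Str.len word = 0 ∨ left_n < 0 ∨ right_n < 0 ∨ (left_n = 0 ∧ right_n = 0) then []
  else
    let n : Int := tokens.length
    (PySem.List.enumerate tokens 0).foldl (fun out p =>
      if p.2 == word then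
        let left := PySem.List.pyGetD tokens (max (p.1 - left_n) 0) ""
        let right := PySem.List.pyGetD tokens (min (p.1 + right_n) (n - 1)) ""
        out ++ [if left_n = 0 then [right] else if right_n = 0 then [left] else [left, right]]
      else out) []

-- ===== PRECONDITION & SPEC =====
-- When the first occurrence of word lies within left_n of the text start (or the last occurrence
-- within right_n of the end), A clamps EVERY occurrence's context to the text boundary and so
-- reports tokens[0] (resp. the last token) as the neighbour even for occurrences whose true
-- neighbour exists; B reports each occurrence's own clamped neighbour, which is what the
-- per-occurrence adjacency of the docstring intends.  D_ holds exactly where the outputs differ.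
def D_get_adjacent_words (tokens : List String) (word : String) (left_n : Int) (right_n : Int) : Prop :=
  word ≠ "" ∧ 0 ≤ min left_n right_n ∧
  ∃ j ∈ pvIndexesA tokens word,
    ((word ∈ tokens.take left_n.toNat ∧ tokens.headD "" ≠ tokens.getD (j.toNat - left_n.toNat) "") ∨
     (word ∈ tokens.drop (tokens.length + 1 - right_n.toNat) ∧
        tokens.getLastD "" ≠ tokens.getD (min (j.toNat + right_n.toNat) (tokens.length - 1)) ""))
instance (tokens : List String) (word : String) (left_n : Int) (right_n : Int) : Decidable (D_get_adjacent_words tokens word left_n right_n) := by unfold D_get_adjacent_words; infer_instance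

def Spec_get_adjacent_words (tokens : List String) (word : String) (left_n : Int) (right_n : Int) (out : List (List String)) : Prop := ¬ D_get_adjacent_words tokens word left_n right_n → out = get_adjacent_words_alt tokens word left_n right_n
instance (tokens : List String) (word : String) (left_n : Int) (right_n : Int) (out : List (List String)) : Decidable (Spec_get_adjacent_words tokens word left_n right_n out) := by unfold Spec_get_adjacent_words; infer_instance

def pvDiffWitness_get_adjacent_words : List String × String × Int × Int := (["a", "x", "b", "x", "c"], "x", 2, 0)
def pvDiffWitnessOut_get_adjacent_words : (List (List String)) × (List (List String)) := ([["a"], ["a"]], [["a"], ["x"]])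

-- ===== CLAIM (what is proved, stated in full; the proofs are below) =====
def Claim_unchanged_get_adjacent_words : Prop := ∀ (tokens : List String) (word : String) (left_n : Int) (right_n : Int), Dom_get_adjacent_words tokens word left_n right_n → Spec_get_adjacent_words tokens word left_n right_n (get_adjacent_words tokens word left_n right_n)
def Claim_changed_get_adjacent_words : Prop := Dom_get_adjacent_words (pvDiffWitness_get_adjacent_words.1) (pvDiffWitness_get_adjacent_words.2.1) (pvDiffWitness_get_adjacent_words.2.2.1) (pvDiffWitness_get_adjacent_words.2.2.2) ∧ D_get_adjacent_words (pvDiffWitness_get_adjacent_words.1) (pvDiffWitness_get_adjacent_words.2.1) (pvDiffWitness_get_adjacent_words.2.2.1) (pvDiffWitness_get_adjacent_words.2.2.2) ∧ get_adjacent_words (pvDiffWitness_get_adjacent_words.1) (pvDiffWitness_get_adjacent_words.2.1) (pvDiffWitness_get_adjacent_words.2.2.1) (pvDiffWitness_get_adjacent_words.2.2.2) = pvDiffWitnessOut_get_adjacent_words.1 ∧ get_adjacent_words_alt (pvDiffWitness_get_adjacent_words.1) (pvDiffWitness_get_adjacent_words.2.1) (pvDiffWitness_get_adjacent_words.2.2.1)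 (pvDiffWitness_get_adjacent_words.2.2.2) = pvDiffWitnessOut_get_adjacent_words.2 ∧ pvDiffWitnessOut_get_adjacent_words.1 ≠ pvDiffWitnessOut_get_adjacent_words.2

def Claim_exact_get_adjacent_words : Prop := ∀ (tokens : List String) (word : String) (left_n : Int) (right_n : Int), Dom_get_adjacent_words tokens word left_n right_n → D_get_adjacent_words tokens word left_n right_n → get_adjacent_words tokens word left_n right_n ≠ get_adjacent_words_alt tokens word left_n right_n

-- ===== LEMMAS AND PROOFS =====

-- the per-occurrence entry each port produces (proof-only helpers)
def pvEntryA (tokens : List String) (l r R i0 i : Int) : List String :=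
  if l = 0 then [PySem.List.pyGetD tokens (min (i + R) ((tokens.length : Int) - 1)) ""]
  else if r = 0 then [PySem.List.pyGetD tokens (if i0 < l then 0 else i - l) ""]
  else [PySem.List.pyGetD tokens (if i0 < l then 0 else i - l) "",
        PySem.List.pyGetD tokens (min (i + R) ((tokens.length : Int) - 1)) ""]

def pvEntryB (tokens : List String) (l r i : Int) : List String :=
  if l = 0 then [PySem.List.pyGetD tokens (min (i + r) ((tokens.length : Int) - 1)) ""]
  else if r = 0 then [PySem.List.pyGetD tokens (max (i - l) 0) ""]
  else [PySem.List.pyGetD tokens (max (i - l) 0) "",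
        PySem.List.pyGetD tokens (min (i + r) ((tokens.length : Int) - 1)) ""]

theorem mem_pvIndexes (tokens : List String) (word : String) {i : Int}
    (h : i ∈ pvIndexesA tokens word) :
    ∃ k : Fin tokens.length, i = (k : Int) ∧ tokens.get k = word := by
  simp only [pvIndexesA, List.mem_map, List.mem_filter] at h
  obtain ⟨p, ⟨hp, hw⟩, rfl⟩ := h
  rw [PySem.List.mem_enumerate_iff] at hp
  obtain ⟨k, hk, rfl⟩ := hp
  refine ⟨⟨k, hk⟩, by simp, ?_⟩
  simpa using hw

theorem pvIndexes_of_getElem (tokens : List String) (word : String) {m : Nat}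
    (hm : m < tokens.length) (hw : tokens[m] = word) :
    (m : Int) ∈ pvIndexesA tokens word := by
  simp only [pvIndexesA, List.mem_map, List.mem_filter]
  refine ⟨((m : Int), word), ⟨?_, by simp⟩, rfl⟩
  rw [PySem.List.mem_enumerate_iff]
  exact ⟨m, hm, by simp [hw]⟩

theorem pvIndexes_pairwise (tokens : List String) (word : String) :
    (pvIndexesA tokens word).Pairwise (· < ·) := by
  apply List.Pairwise.map
  · exact fun a b h => h
  · exact (PySem.List.pairwise_lt_enumerate tokens 0).filter _

theorem pvIndexes_head_le (tokens : List String) (word : String) {i : Int}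
    (h : i ∈ pvIndexesA tokens word) :
    PySem.List.pyGetD (pvIndexesA tokens word) 0 0 ≤ i := by
  have hp := pvIndexes_pairwise tokens word
  cases hidx : pvIndexesA tokens word with
  | nil => simp [hidx] at h
  | cons a t =>
    rw [hidx] at h hp
    rw [PySem.List.pyGetD_zero_cons]
    rcases List.mem_cons.mp h with rfl | hm
    · exact le_refl _
    · exact le_of_lt ((List.pairwise_cons.mp hp).1 _ hm)

theorem pv_le_last {l : List Int} (hp : l.Pairwise (· < ·)) {x : Int} (hx : x ∈ l)
    (h : l ≠ []) : x ≤ l.getLast h := by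
  obtain ⟨m, hm, rfl⟩ := List.mem_iff_getElem.mp hx
  rw [List.getLast_eq_getElem]
  rcases Nat.lt_or_ge m (l.length - 1) with hlt | hge
  · exact le_of_lt ((List.pairwise_iff_getElem.mp hp) m (l.length - 1) hm (by omega) hlt)
  · exact le_of_eq (getElem_congr_idx (by omega))

theorem pv_slice_first (tokens : List String) (a b : Int)
    (ha : 0 ≤ a) (hab : a < b) (hlen : a < (tokens.length : Int)) :
    PySem.List.pyGetD (PySem.List.slice tokens (some a) (some b)) 0 "" =
      PySem.List.pyGetD tokens a "" := by
  rw [PySem.List.slice_toNat _ ha (by omega)]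
  rw [PySem.List.pyGetD_eq_getElem _ _ ha hlen,
      PySem.List.pyGetD_eq_getElem _ _ (by omega) (by simp; omega)]
  simp [List.getElem_take, List.getElem_drop]

theorem pv_slice_last (tokens : List String) (a b : Int)
    (ha : 0 ≤ a) (hab : a < b) (hlen : a < (tokens.length : Int)) :
    PySem.List.pyGetD (PySem.List.slice tokens (some a) (some b)) (-1) "" =
      PySem.List.pyGetD tokens (min (b - 1) ((tokens.length : Int) - 1)) "" := by
  rw [PySem.List.slice_toNat _ ha (by omega)]
  have hne : (tokens.drop a.toNat).take (b.toNat - a.toNat) ≠ [] := by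
    apply List.ne_nil_of_length_pos
    simp
    omega
  rw [PySem.List.pyGetD_neg_one _ _ hne, List.getLast_eq_getElem,
      PySem.List.pyGetD_eq_getElem _ _ (by omega) (by omega)]
  simp [List.getElem_take, List.getElem_drop]
  congr 1
  omega

-- pyGetD at an in-range nonnegative Int index as a Nat getD
theorem pv_pyGetD_toNat (tokens : List String) (m : Int)
    (h0 : 0 ≤ m) (h1 : m < (tokens.length : Int)) :
    PySem.List.pyGetD tokens m "" = tokens.getD m.toNat "" := by
  rw [PySem.List.pyGetD_eq_getElem _ _ h0 h1, List.getD_eq_getElem _ _ (by omega)]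

theorem pv_headD (l : List String) : l.headD "" = l.getD 0 "" := by
  cases l <;> rfl

theorem pv_getLastD (l : List String) (h : 0 < l.length) : l.getLastD "" = l.getD (l.length - 1) "" := by
  induction l with
  | nil => simp at h
  | cons a t ih =>
    cases t with
    | nil => rfl
    | cons b u =>
      have := ih (by simp)
      simpa [List.getLastD] using this

theorem pv_conc (tokens : List String) (word : String) (l r : Int)
    (hw : ¬ PySem.Str.len word = 0) (hl : ¬ l < 0) (hr : ¬ r < 0) (hz : ¬ (l = 0 ∧ r = 0))
    (i0 : Int) (t : List Int) (hidx : pvIndexesA tokens word = i0 :: t) :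
    get_concordance tokens word l r =
      (i0 :: t).map (fun ind => PySem.List.slice tokens
        (some (if i0 < l then 0 else ind - l))
        (some (ind + 1 + (if PySem.List.pyGetD (i0 :: t) (-1) 0 + r > (tokens.length : Int)
                          then (tokens.length : Int) else r)))) := by
  simp only [get_concordance, if_neg hw, hidx]
  rw [if_neg (by simp; omega), if_neg (by rintro ⟨h1, h2⟩; exact hz ⟨h2, h1⟩),
      PySem.List.pyGetD_zero_cons]
  by_cases hcl : i0 - l < 0
  · rw [if_pos hcl]
    apply List.map_congr_left
    intro i _
    rw [if_pos (show i0 < l by omega)]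
  · rw [if_neg hcl]
    apply List.map_congr_left
    intro i _
    rw [if_neg (show ¬ i0 < l by omega)]

-- every occurrence index is a Fin index holding word, and lies at or after the first one
theorem pv_occ_facts (tokens : List String) (word : String) (i0 : Int) (t : List Int)
    (hidx : pvIndexesA tokens word = i0 :: t) :
    ∀ i ∈ i0 :: t, (∃ k : Fin tokens.length, i = (k : Int) ∧ tokens.get k = word) ∧ i0 ≤ i := by
  intro i hi
  refine ⟨mem_pvIndexes tokens word (hidx ▸ hi), ?_⟩
  have := pvIndexes_head_le tokens word (hidx ▸ hi)
  rwa [hidx, PySem.List.pyGetD_zero_cons] at this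

-- port A's output as a map of per-occurrence entries
theorem pv_A_form (tokens : List String) (word : String) (l r : Int)
    (hw0 : word ≠ "") (hl : ¬ l < 0) (hr : ¬ r < 0) (hz : ¬ (l = 0 ∧ r = 0))
    (i0 : Int) (t : List Int) (hidx : pvIndexesA tokens word = i0 :: t)
    (R : Int) (hRdef : R = if PySem.List.pyGetD (i0 :: t) (-1) 0 + r > (tokens.length : Int)
                           then (tokens.length : Int) else r) :
    get_adjacent_words tokens word l r = (i0 :: t).map (pvEntryA tokens l r R i0) := by
  have hw : ¬ PySem.Str.len word = 0 := by simp [hw0]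
  have hmem := pv_occ_facts tokens word i0 t hidx
  obtain ⟨k0, hk0e, hk0w⟩ := (hmem i0 (List.mem_cons_self)).1
  have h00 : 0 ≤ i0 ∧ i0 < (tokens.length : Int) := by
    constructor
    · rw [hk0e]; positivity
    · rw [hk0e]; exact_mod_cast k0.isLt
  have hR : 0 ≤ R := by rw [hRdef]; split <;> omega
  rw [get_adjacent_words, pv_conc tokens word l r hw hl hr hz i0 t hidx, ← hRdef]
  rw [if_neg (show ¬ ((i0 :: t).map (fun ind => PySem.List.slice tokens
        (some (if i0 < l then 0 else ind - l)) (some (ind + 1 + R)))).length = 0 by simp)]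
  by_cases hL0 : l = 0
  · rw [if_pos hL0, List.map_map]
    apply List.map_congr_left
    intro i hi
    simp only [Function.comp_apply]
    obtain ⟨⟨ki, hkie, hkiw⟩, hii⟩ := hmem i hi
    have hi0 : 0 ≤ i := by rw [hkie]; positivity
    have hin : i < (tokens.length : Int) := by rw [hkie]; exact_mod_cast ki.isLt
    rw [pvEntryA, if_pos hL0, if_neg (show ¬ i0 < l by omega)]
    rw [pv_slice_last tokens (i - l) (i + 1 + R) (by omega) (by omega) (by omega)]
    rw [show i + 1 + R - 1 = i + R by ring]
  · rw [if_neg hL0]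
    by_cases hR0 : r = 0
    · rw [if_pos hR0, List.map_map]
      apply List.map_congr_left
      intro i hi
      simp only [Function.comp_apply]
      obtain ⟨⟨ki, hkie, hkiw⟩, hii⟩ := hmem i hi
      have hi0 : 0 ≤ i := by rw [hkie]; positivity
      have hin : i < (tokens.length : Int) := by rw [hkie]; exact_mod_cast ki.isLt
      rw [pvEntryA, if_neg hL0, if_pos hR0]
      rw [pv_slice_first tokens (if i0 < l then 0 else i - l) (i + 1 + R)
        (by split <;> omega) (by split <;> omega) (by split <;> omega)]
    · rw [if_neg hR0, List.map_map]
      apply List.map_congr_left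
      intro i hi
      simp only [Function.comp_apply]
      obtain ⟨⟨ki, hkie, hkiw⟩, hii⟩ := hmem i hi
      have hi0 : 0 ≤ i := by rw [hkie]; positivity
      have hin : i < (tokens.length : Int) := by rw [hkie]; exact_mod_cast ki.isLt
      rw [pvEntryA, if_neg hL0, if_neg hR0]
      rw [pv_slice_first tokens (if i0 < l then 0 else i - l) (i + 1 + R)
        (by split <;> omega) (by split <;> omega) (by split <;> omega)]
      have hlast := pv_slice_last tokens (if i0 < l then 0 else i - l) (i + 1 + R)
        (by split <;> omega) (by split <;> omega) (by split <;> omega)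
      rw [show i + 1 + R - 1 = i + R by ring] at hlast
      rw [hlast]

-- port B's output as a map of per-occurrence entries
theorem pv_B_form (tokens : List String) (word : String) (l r : Int)
    (hw0 : word ≠ "") (hl : ¬ l < 0) (hr : ¬ r < 0) (hz : ¬ (l = 0 ∧ r = 0))
    (i0 : Int) (t : List Int) (hidx : pvIndexesA tokens word = i0 :: t) :
    get_adjacent_words_alt tokens word l r = (i0 :: t).map (pvEntryB tokens l r) := by
  have hw : ¬ PySem.Str.len word = 0 := by simp [hw0]
  rw [get_adjacent_words_alt]
  rw [if_neg (show ¬ (PySem.Str.len word = 0 ∨ l < 0 ∨ r < 0 ∨ (l = 0 ∧ r = 0)) by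
    push Not; exact ⟨hw, by omega, by omega, fun h1 h2 => hz ⟨h1, h2⟩⟩)]
  simp only [PySem.List.foldl_append_if, List.nil_append]
  rw [← hidx, pvIndexesA, List.map_map]
  rfl

theorem pv_main (tokens : List String) (word : String) (left_n right_n : Int)
    (hD : ¬ D_get_adjacent_words tokens word left_n right_n) :
    get_adjacent_words tokens word left_n right_n = get_adjacent_words_alt tokens word left_n right_n := by
  by_cases hw0 : word = ""
  · simp [get_adjacent_words, get_adjacent_words_alt, get_concordance, hw0]
  have hw : ¬ PySem.Str.len word = 0 := by simp [hw0]
  by_cases hl : left_n < 0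
  · simp [get_adjacent_words, get_adjacent_words_alt, get_concordance, hw0, hl]
  by_cases hr : right_n < 0
  · simp [get_adjacent_words, get_adjacent_words_alt, get_concordance, hw0, hl, hr]
  by_cases hz : left_n = 0 ∧ right_n = 0
  · simp [get_adjacent_words, get_adjacent_words_alt, get_concordance, hw0, hz.1, hz.2]
  -- ¬D_ with the base conjuncts established gives the boundary-agreement fact
  have HD : ∀ j ∈ pvIndexesA tokens word,
      (word ∈ tokens.take left_n.toNat →
        tokens.headD "" = tokens.getD (j.toNat - left_n.toNat) "") ∧
      (word ∈ tokens.drop (tokens.length + 1 - right_n.toNat) →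
        tokens.getLastD "" = tokens.getD (min (j.toNat + right_n.toNat) (tokens.length - 1)) "") := by
    have hnb : ¬ ∃ j ∈ pvIndexesA tokens word,
        ((word ∈ tokens.take left_n.toNat ∧ tokens.headD "" ≠ tokens.getD (j.toNat - left_n.toNat) "") ∨
         (word ∈ tokens.drop (tokens.length + 1 - right_n.toNat) ∧
            tokens.getLastD "" ≠ tokens.getD (min (j.toNat + right_n.toNat) (tokens.length - 1)) "")) := by
      intro hb
      exact hD ⟨hw0, by omega, hb⟩
    push Not at hnb
    intro j hj
    exact ⟨fun h1 => (hnb j hj).1 h1, fun h1 => (hnb j hj).2 h1⟩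
  cases hidx : pvIndexesA tokens word with
  | nil =>
    have hB : ((PySem.List.enumerate tokens 0).filter (fun p => p.2 == word)) = [] := by
      by_contra hne
      obtain ⟨p, hp⟩ := List.exists_mem_of_ne_nil _ hne
      have : p.1 ∈ pvIndexesA tokens word := List.mem_map_of_mem hp
      simp [hidx] at this
    have hA : get_adjacent_words tokens word left_n right_n = [] := by
      simp [get_adjacent_words, get_concordance, hidx]
    rw [hA, get_adjacent_words_alt]
    split
    · rfl
    · simp only [PySem.List.foldl_append_if, hB, List.map_nil, List.append_nil]
  | cons i0 t =>
    have hmem := pv_occ_facts tokens word i0 t hidx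
    obtain ⟨k0, hk0e, hk0w⟩ := (hmem i0 (List.mem_cons_self)).1
    have h00 : 0 ≤ i0 ∧ i0 < (tokens.length : Int) := by
      constructor
      · rw [hk0e]; positivity
      · rw [hk0e]; exact_mod_cast k0.isLt
    set n : Int := (tokens.length : Int) with hn
    set R : Int := if PySem.List.pyGetD (i0 :: t) (-1) 0 + right_n > n
                   then n else right_n with hRdef
    have hR : 0 ≤ R := by rw [hRdef]; split <;> omega
    have hRor : R = n ∨ R = right_n := by
      rw [hRdef]; split
      · exact Or.inl rfl
      · exact Or.inr rfl
    -- if the right clamp fired, every occurrence's right neighbour is the last token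
    have hRfact : R ≠ right_n →
        ∀ i ∈ i0 :: t, tokens.getD (tokens.length - 1) "" =
          tokens.getD (min (i + right_n) (n - 1)).toNat "" := by
      intro hne i hi
      have hcond : PySem.List.pyGetD (i0 :: t) (-1) 0 + right_n > n := by
        by_contra hc
        rw [hRdef, if_neg hc] at hne
        exact hne rfl
      have hlastmem : (i0 :: t).getLast (List.cons_ne_nil i0 t) ∈ i0 :: t := List.getLast_mem _
      obtain ⟨kl, hkle, hklw⟩ := (hmem _ hlastmem).1
      rw [PySem.List.pyGetD_neg_one _ _ (List.cons_ne_nil i0 t), hkle] at hcond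
      obtain ⟨kj, hkje, hkjw⟩ := (hmem i hi).1
      have htrig : word ∈ tokens.drop (tokens.length + 1 - right_n.toNat) := by
        rw [List.mem_iff_getElem]
        refine ⟨kl.val - (tokens.length + 1 - right_n.toNat), by simp; omega, ?_⟩
        have hgd : (tokens.drop (tokens.length + 1 - right_n.toNat))[kl.val -
              (tokens.length + 1 - right_n.toNat)]'(by simp; omega) = tokens[kl.val]'kl.isLt := by
          rw [List.getElem_drop]
          exact getElem_congr_idx (by omega)
        rw [hgd, ← hklw]
        simp [List.get_eq_getElem]
      have hval := (HD i (hidx ▸ hi)).2 htrig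
      have hklt := kj.isLt
      rw [pv_getLastD tokens kl.pos] at hval
      rw [show (min (i + right_n) (n - 1)).toNat
            = min (i.toNat + right_n.toNat) (tokens.length - 1) by omega]
      exact hval
    -- if the left clamp fired, every occurrence's left neighbour is the first token
    have hLfact : i0 < left_n → ∀ i ∈ i0 :: t,
        tokens.getD 0 "" = tokens.getD (max (i - left_n) 0).toNat "" := by
      intro hcl i hi
      obtain ⟨kj, hkje, hkjw⟩ := (hmem i hi).1
      have hiB : 0 ≤ i ∧ i < (tokens.length : Int) := by
        constructor
        · rw [hkje]; positivity
        · rw [hkje]; exact_mod_cast kj.isLt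
      have htrig : word ∈ tokens.take left_n.toNat := by
        rw [List.mem_iff_getElem]
        refine ⟨k0.val, by simp; omega, ?_⟩
        rw [List.getElem_take, ← hk0w]
        simp [List.get_eq_getElem]
      have hval := (HD i (hidx ▸ hi)).1 htrig
      rw [pv_headD tokens] at hval
      rw [show (max (i - left_n) 0).toNat = i.toNat - left_n.toNat by omega]
      exact hval
    rw [pv_A_form tokens word left_n right_n hw0 hl hr hz i0 t hidx R hRdef,
        pv_B_form tokens word left_n right_n hw0 hl hr hz i0 t hidx]
    apply List.map_congr_left
    intro i hi
    obtain ⟨⟨ki, hkie, hkiw⟩, hii⟩ := hmem i hi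
    have hi0 : 0 ≤ i := by rw [hkie]; positivity
    have hin : i < n := by rw [hkie, hn]; exact_mod_cast ki.isLt
    have hnpos : 0 < n := by omega
    have hlastval : PySem.List.pyGetD tokens (min (i + R) (n - 1)) "" =
        PySem.List.pyGetD tokens (min (i + right_n) (n - 1)) "" := by
      rw [pv_pyGetD_toNat tokens _ (by omega) (by omega),
          pv_pyGetD_toNat tokens _ (by omega) (by omega)]
      by_cases hRc : R = right_n
      · rw [hRc]
      · have hRn : R = n := by
          rcases hRor with h | h
          · exact h
          · exact absurd h hRc
        have hmin : min (i + R) (n - 1) = n - 1 := by omega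
        rw [hmin, show ((n : Int) - 1).toNat = tokens.length - 1 by omega]
        exact hRfact hRc i hi
    have hfstval : PySem.List.pyGetD tokens (if i0 < left_n then 0 else i - left_n) "" =
        PySem.List.pyGetD tokens (max (i - left_n) 0) "" := by
      by_cases hcl : i0 < left_n
      · rw [if_pos hcl]
        rw [pv_pyGetD_toNat tokens 0 le_rfl (by omega),
            pv_pyGetD_toNat tokens _ (by omega) (by omega)]
        exact hLfact hcl i hi
      · rw [if_neg hcl, show max (i - left_n) 0 = i - left_n by omega]
    rw [pvEntryA, pvEntryB, hlastval, hfstval]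


theorem pv_tight (tokens : List String) (word : String) (left_n right_n : Int)
    (hD : D_get_adjacent_words tokens word left_n right_n) :
    get_adjacent_words tokens word left_n right_n ≠ get_adjacent_words_alt tokens word left_n right_n := by
  obtain ⟨hw0, hmin, j, hj, harm⟩ := hD
  have hl : ¬ left_n < 0 := by omega
  have hr : ¬ right_n < 0 := by omega
  cases hidx : pvIndexesA tokens word with
  | nil => exact absurd (hidx ▸ hj) (by simp)
  | cons i0 t =>
    have hj' : j ∈ i0 :: t := hidx ▸ hj
    have hmem := pv_occ_facts tokens word i0 t hidx
    obtain ⟨kj, hkje, hkjw⟩ := (hmem j hj').1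
    have hj0 : 0 ≤ j := by rw [hkje]; positivity
    have hjn : j < (tokens.length : Int) := by rw [hkje]; exact_mod_cast kj.isLt
    have hnpos : 0 < tokens.length := kj.pos
    set n : Int := (tokens.length : Int) with hn
    set R : Int := if PySem.List.pyGetD (i0 :: t) (-1) 0 + right_n > n
                   then n else right_n with hRdef
    rcases harm with ⟨wl, wne⟩ | ⟨wr, wne⟩
    · -- left arm: the left clamp fired and j's own left neighbour is not tokens[0]
      have hlpos : 0 < left_n := by
        by_contra hc
        rw [show left_n.toNat = 0 by omega] at wl
        simp at wl
      have hz : ¬ (left_n = 0 ∧ right_n = 0) := by omega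
      obtain ⟨m, hm, hmw⟩ := List.mem_iff_getElem.mp wl
      have hmlen : m < tokens.length := by simp at hm; omega
      have hml : (m : Int) < left_n := by simp at hm; omega
      have hmmem : (m : Int) ∈ pvIndexesA tokens word :=
        pvIndexes_of_getElem tokens word hmlen (by rw [← hmw, List.getElem_take])
      have hcl : i0 < left_n := by
        have := (hmem _ (hidx ▸ hmmem)).2
        omega
      intro heq
      rw [pv_A_form tokens word left_n right_n hw0 hl hr hz i0 t hidx R hRdef,
          pv_B_form tokens word left_n right_n hw0 hl hr hz i0 t hidx] at heq
      have hpt := List.map_inj_left.mp heq j hj'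
      have hfst : PySem.List.pyGetD tokens 0 "" ≠ PySem.List.pyGetD tokens (max (j - left_n) 0) "" := by
        intro he
        apply wne
        rw [pv_headD]
        rw [pv_pyGetD_toNat tokens 0 le_rfl (by omega),
            pv_pyGetD_toNat tokens _ (by omega) (by omega)] at he
        rw [show (0 : Int).toNat = 0 from rfl] at he
        rw [show (max (j - left_n) 0).toNat = j.toNat - left_n.toNat by omega] at he
        exact he
      rw [pvEntryA, pvEntryB, if_neg (show ¬ left_n = 0 by omega),
          if_neg (show ¬ left_n = 0 by omega), if_pos hcl] at hpt
      by_cases hR0 : right_n = 0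
      · rw [if_pos hR0, if_pos hR0] at hpt
        simp only [List.cons.injEq, and_true] at hpt
        exact hfst hpt
      · rw [if_neg hR0, if_neg hR0] at hpt
        simp only [List.cons.injEq, and_true] at hpt
        exact hfst hpt.1
    · -- right arm: the right clamp fired and j's own right neighbour is not the last token
      have hrpos : 0 < right_n := by
        by_contra hc
        rw [List.drop_eq_nil_of_le (by omega)] at wr
        simp at wr
      have hz : ¬ (left_n = 0 ∧ right_n = 0) := by omega
      obtain ⟨m, hm, hmw⟩ := List.mem_iff_getElem.mp wr
      have hdm : tokens.length + 1 - right_n.toNat + m < tokens.length := by simp at hm; omega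
      rw [List.getElem_drop] at hmw
      have hocc : ((tokens.length + 1 - right_n.toNat + m : Nat) : Int) ∈ pvIndexesA tokens word :=
        pvIndexes_of_getElem tokens word hdm hmw
      have hlastle := pv_le_last (hidx ▸ pvIndexes_pairwise tokens word) (hidx ▸ hocc)
        (List.cons_ne_nil i0 t)
      have hcond : PySem.List.pyGetD (i0 :: t) (-1) 0 + right_n > n := by
        rw [PySem.List.pyGetD_neg_one _ _ (List.cons_ne_nil i0 t)]
        omega
      have hRn : R = n := by rw [hRdef, if_pos hcond]
      intro heq
      rw [pv_A_form tokens word left_n right_n hw0 hl hr hz i0 t hidx R hRdef,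
          pv_B_form tokens word left_n right_n hw0 hl hr hz i0 t hidx] at heq
      have hpt := List.map_inj_left.mp heq j hj'
      have hlst : PySem.List.pyGetD tokens (min (j + R) (n - 1)) "" ≠
          PySem.List.pyGetD tokens (min (j + right_n) (n - 1)) "" := by
        intro he
        apply wne
        rw [pv_getLastD tokens hnpos]
        rw [pv_pyGetD_toNat tokens _ (by omega) (by omega),
            pv_pyGetD_toNat tokens _ (by omega) (by omega)] at he
        rw [show (min (j + R) (n - 1)).toNat = tokens.length - 1 by omega] at he
        rw [show (min (j + right_n) (n - 1)).toNat
              = min (j.toNat + right_n.toNat) (tokens.length - 1) by omega] at he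
        exact he
      rw [pvEntryA, pvEntryB] at hpt
      by_cases hL0 : left_n = 0
      · rw [if_pos hL0, if_pos hL0] at hpt
        simp only [List.cons.injEq, and_true] at hpt
        exact hlst hpt
      · rw [if_neg hL0, if_neg hL0, if_neg (show ¬ right_n = 0 by omega),
            if_neg (show ¬ right_n = 0 by omega)] at hpt
        simp only [List.cons.injEq, and_true] at hpt
        exact hlst hpt.2

-- ===== VERDICT (by name: the statements are the Claim_ definitions above) =====
theorem get_adjacent_words_spec : Claim_unchanged_get_adjacent_words := by
  intro tokens word left_n right_n _ hD
  exact pv_main tokens word left_n right_n hD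

theorem get_adjacent_words_changed : Claim_changed_get_adjacent_words := by
  unfold Claim_changed_get_adjacent_words; decide

theorem get_adjacent_words_tight : Claim_exact_get_adjacent_words := by
  intro tokens word left_n right_n _ hD
  exact pv_tight tokens word left_n right_n hD
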